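-- pv_equiv track=rewrite | github.com/Vottz/master-thesis | experiments/3simpleCA.py | energyDemand
-- ===== SOURCE A (Python) =====
-- import math
--
-- def energyDemand(configuration, user_demand):
--     ed = math.ceil(user_demand / configuration[0][2]) * configuration[0][1]
--     user_temp = user_demand * configuration[0][0]
--     for i in range(1,len(configuration)):
--         if (configuration[i][2] == 10000000000): #ToDo find a better way
--             ed += 0
--         else:
--             ed += math.ceil(user_temp / configuration[i][2]) * configuration[i][1]
--         user_temp *= configuration[i][0]
--     return(ed)
-- ===== SOURCE B (Python) =====
-- import math
--
-- def energyDemand(configuration, user_demand):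
--     # Divide-and-conquer over the layers after the first: solve(rows, temp) returns
--     # (energy demanded by these rows when `temp` units enter them, units leaving the
--     # last row).  Integer multiplication is associative, so splitting the chain in
--     # half and composing the outgoing demands is exact.
--     def solve(rows, temp):
--         if not rows:
--             return 0, temp
--         if len(rows) == 1:
--             layer = rows[0]
--             e = 0 if layer[2] == 10000000000 else math.ceil(temp / layer[2]) * layer[1]
--             return e, temp * layer[0]
--         mid = len(rows) // 2
--         e1, t1 = solve(rows[:mid], temp)
--         e2, t2 = solve(rows[mid:], t1)
--         return e1 + e2, t2
--     head = configuration[0]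
--     e0 = math.ceil(user_demand / head[2]) * head[1]
--     e_rest, _ = solve(configuration[1:], user_demand * head[0])
--     return e0 + e_rest
-- ===== Notes on version B (the rewrite author's own statement) =====
-- stated objective: alternative
-- what changed: A's single indexed loop with two mutable accumulators is replaced by a divide-and-conquer recursion: the layer chain is split in half, each half is solved independently as (energy, outgoing demand), and the halves are composed; correct because the running demand is an exact integer product, hence associative.
import Mathlib
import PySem

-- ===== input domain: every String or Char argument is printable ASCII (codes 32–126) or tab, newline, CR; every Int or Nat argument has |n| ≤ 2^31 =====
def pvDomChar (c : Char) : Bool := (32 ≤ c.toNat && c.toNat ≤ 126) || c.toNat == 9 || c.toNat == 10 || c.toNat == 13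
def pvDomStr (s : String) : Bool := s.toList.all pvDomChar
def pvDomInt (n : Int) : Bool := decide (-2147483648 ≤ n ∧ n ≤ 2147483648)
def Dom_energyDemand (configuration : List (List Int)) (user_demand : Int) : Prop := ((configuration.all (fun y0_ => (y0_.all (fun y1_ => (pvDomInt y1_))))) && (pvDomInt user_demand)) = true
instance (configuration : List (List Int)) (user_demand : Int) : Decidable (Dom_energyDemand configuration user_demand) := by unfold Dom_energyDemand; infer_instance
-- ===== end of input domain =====

-- B replaces A's single indexed loop (two mutable accumulators) by a divide-and-conquer
-- recursion on the layer chain; objective: alternative decomposition, same cost, no speed claim.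

-- ===== PORT A =====
-- math.ceil(a / b) for Python ints, b ≠ 0: CPython's int.__truediv__ produces the
-- correctly rounded binary64 value (round to nearest, ties to even, 53-bit significand);
-- this emulates that rounding exactly in integer arithmetic and then takes the ceiling.
-- Exact whenever b ≠ 0 and the quotient does not overflow binary64 (|a/b| < (2^54-1)·2^970,
-- guaranteed by Pre_); junk value 0 when b = 0 (Python raises ZeroDivisionError there).
def pyCeilDiv (a b : Int) : Int :=
  let a' : Int := if b < 0 then -a else a          -- a/b = (-a)/(-b): normalise divisor > 0
  let B : Nat := b.natAbs
  if a' = 0 ∨ B = 0 then 0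
  else
    let A : Nat := a'.natAbs
    -- exponent e with 2^e ≤ A/B < 2^(e+1)
    let e0 : Int := (Nat.log2 A : Int) - (Nat.log2 B : Int)
    let ble : Int → Bool := fun e =>
      if 0 ≤ e then decide (B <<< e.toNat ≤ A) else decide (B ≤ A <<< (-e).toNat)
    let e : Int := if ble e0 then e0 else e0 - 1
    -- significand m = round-nearest-even of A·2^(52-e)/B, m ∈ [2^52, 2^53]
    let nd : Nat × Nat :=
      if 0 ≤ 52 - e then (A <<< (52 - e).toNat, B) else (A, B <<< (e - 52).toNat)
    let q : Nat := nd.1 / nd.2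
    let r : Nat := nd.1 % nd.2
    let m : Nat :=
      if nd.2 < 2 * r then q + 1
      else if 2 * r < nd.2 then q
      else if q % 2 = 1 then q + 1 else q
    let d : Nat := 1 <<< (52 - e).toNat
    -- ceil of (sign a')·m·2^(e-52)
    if 0 < a' then
      if 52 ≤ e then ((m <<< (e - 52).toNat : Nat) : Int)
      else (((m + d - 1) / d : Nat) : Int)
    else
      if 52 ≤ e then (-((m <<< (e - 52).toNat : Nat) : Int))
      else (-((m / d : Nat) : Int))

-- loop body of A: state (ed, user_temp), one row per iteration
def stepA (s : Int × Int) (row : List Int) : Int × Int :=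
  ((if PySem.List.pyGetD row 2 0 = 10000000000 then s.1 + 0
    else s.1 + pyCeilDiv s.2 (PySem.List.pyGetD row 2 0) * PySem.List.pyGetD row 1 0),
   s.2 * PySem.List.pyGetD row 0 0)

def energyDemand (configuration : List (List Int)) (user_demand : Int) : Int :=
  let row0 := PySem.List.pyGetD configuration 0 []
  let ed := pyCeilDiv user_demand (PySem.List.pyGetD row0 2 0) * PySem.List.pyGetD row0 1 0
  let ut := user_demand * PySem.List.pyGetD row0 0 0
  ((PySem.List.pyRange 1 (configuration.length : Int) 1).foldl
      (fun s i => stepA s (PySem.List.pyGetD configuration i [])) (ed, ut)).1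

-- ===== PORT B =====
-- Source B's divide-and-conquer helper `solve(rows, temp)`: returns (energy of these rows
-- given incoming demand `temp`, demand leaving the last row).  rows[:mid] / rows[mid:]
-- with 0 ≤ mid ≤ len are exactly take/drop.
def solveB : List (List Int) → Int → Int × Int
  | [], t => (0, t)
  | [layer], t =>
      ((if PySem.List.pyGetD layer 2 0 = 10000000000 then 0
        else pyCeilDiv t (PySem.List.pyGetD layer 2 0) * PySem.List.pyGetD layer 1 0),
       t * PySem.List.pyGetD layer 0 0)
  | r1 :: r2 :: rs, t =>
      let mid := (r1 :: r2 :: rs).length / 2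
      let p1 := solveB ((r1 :: r2 :: rs).take mid) t
      let p2 := solveB ((r1 :: r2 :: rs).drop mid) p1.2
      (p1.1 + p2.1, p2.2)
termination_by rows _ => rows.length
decreasing_by
  · simp only [List.length_take, List.length_cons]; omega
  · simp only [List.length_drop, List.length_cons]; omega

def energyDemand_alt (configuration : List (List Int)) (user_demand : Int) : Int :=
  let head := PySem.List.pyGetD configuration 0 []
  let e0 := pyCeilDiv user_demand (PySem.List.pyGetD head 2 0) * PySem.List.pyGetD head 1 0
  -- configuration[1:] = drop 1
  e0 + (solveB (configuration.drop 1) (user_demand * PySem.List.pyGetD head 0 0)).1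

-- ===== PRECONDITION & SPEC =====
-- running numerators u·∏_{j<i} configuration[j][0] used at rows i ≥ 1 (independent helper)
def pvPref (u : Int) : List (List Int) → List Int
  | [] => []
  | r :: rs => (u * r.getD 0 0) :: pvPref (u * r.getD 0 0) rs

-- Pre_: exactly the inputs where Python A returns normally — configuration nonempty and
-- every row of length ≥ 3 (else IndexError), each used divisor nonzero (else
-- ZeroDivisionError), and each performed float division below binary64 overflow
-- (else OverflowError); it excludes no input on which A returns.
def Pre_energyDemand (configuration : List (List Int)) (user_demand : Int) : Prop :=
  configuration ≠ [] ∧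
  (∀ r ∈ configuration, 3 ≤ r.length) ∧
  (configuration.headD []).getD 2 0 ≠ 0 ∧
  ∀ p ∈ (pvPref user_demand configuration).zip (configuration.drop 1),
    p.2.getD 2 0 = 10000000000 ∨
      (p.2.getD 2 0 ≠ 0 ∧ p.1.natAbs < (p.2.getD 2 0).natAbs * ((((1:Nat) <<< 54) - 1) * ((1:Nat) <<< 970)))

instance (configuration : List (List Int)) (user_demand : Int) :
    Decidable (Pre_energyDemand configuration user_demand) := by
  unfold Pre_energyDemand; infer_instance

def pvWitness_energyDemand : List (List Int) × Int := ([[1, 1, 2], [3, 1, 2]], 5)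

def Spec_energyDemand (configuration : List (List Int)) (user_demand : Int) (out : Int) : Prop :=
  out = energyDemand_alt configuration user_demand
instance (configuration : List (List Int)) (user_demand : Int) (out : Int) :
    Decidable (Spec_energyDemand configuration user_demand out) := by
  unfold Spec_energyDemand; infer_instance

-- ===== CLAIM (what is proved, stated in full; the proofs are below) =====
def Claim_equal_energyDemand : Prop := ∀ (configuration : List (List Int)) (user_demand : Int), Dom_energyDemand configuration user_demand → Pre_energyDemand configuration user_demand → Spec_energyDemand configuration user_demand (energyDemand configuration user_demand)

-- ===== LEMMAS AND PROOFS =====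

-- canonical linear recurrences both ports reduce to
def sumT (t : Int) : List (List Int) → Int
  | [] => 0
  | row :: rs =>
      (if PySem.List.pyGetD row 2 0 = 10000000000 then 0
       else pyCeilDiv t (PySem.List.pyGetD row 2 0) * PySem.List.pyGetD row 1 0) +
      sumT (t * PySem.List.pyGetD row 0 0) rs

def pvTprod (t : Int) : List (List Int) → Int
  | [] => t
  | row :: rs => pvTprod (t * PySem.List.pyGetD row 0 0) rs

-- A-side: the interleaved fold accumulates ed + sumT
theorem foldA_eq_sumT (rows : List (List Int)) (ed t : Int) :
    (rows.foldl stepA (ed, t)).1 = ed + sumT t rows := by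
  induction rows generalizing ed t with
  | nil => simp [sumT]
  | cons row rs ih =>
    simp only [List.foldl_cons, sumT, stepA]
    rw [ih]
    split_ifs <;> ring

-- splitting laws for the two recurrences
theorem sumT_append (xs ys : List (List Int)) (t : Int) :
    sumT t (xs ++ ys) = sumT t xs + sumT (pvTprod t xs) ys := by
  induction xs generalizing t with
  | nil => simp [sumT, pvTprod]
  | cons x xs ih => simp only [List.cons_append, sumT, pvTprod, ih]; ring

theorem pvTprod_append (xs ys : List (List Int)) (t : Int) :
    pvTprod t (xs ++ ys) = pvTprod (pvTprod t xs) ys := by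
  induction xs generalizing t with
  | nil => simp [pvTprod]
  | cons x xs ih => simp only [List.cons_append, pvTprod, ih]

-- B-side: divide and conquer computes exactly (sumT, pvTprod)
theorem solveB_eq (rows : List (List Int)) (t : Int) :
    solveB rows t = (sumT t rows, pvTprod t rows) := by
  match rows with
  | [] => simp [solveB, sumT, pvTprod]
  | [layer] => simp [solveB, sumT, pvTprod]
  | r1 :: r2 :: rs =>
    rw [solveB]
    rw [solveB_eq (List.take ((r1 :: r2 :: rs).length / 2) (r1 :: r2 :: rs)) t]
    rw [solveB_eq (List.drop ((r1 :: r2 :: rs).length / 2) (r1 :: r2 :: rs)) _]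
    have h := List.take_append_drop ((r1 :: r2 :: rs).length / 2) (r1 :: r2 :: rs)
    conv_rhs => rw [← h, sumT_append, pvTprod_append]
termination_by rows.length
decreasing_by
  · simp only [List.length_take, List.length_cons]; omega
  · simp only [List.length_drop, List.length_cons]; omega

-- both ports, on any input, equal head-term + sumT
theorem ports_agree (configuration : List (List Int)) (user_demand : Int) :
    energyDemand configuration user_demand = energyDemand_alt configuration user_demand := by
  cases configuration with
  | nil =>
    simp [energyDemand, energyDemand_alt, solveB, PySem.List.pyRange_one_eq_nil, PySem.List.pyGetD]
  | cons c0 rest =>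
    simp only [energyDemand, energyDemand_alt]
    rw [PySem.List.foldl_pyRange_pyGetD' (c0 :: rest) ([] : List Int) stepA _ (by omega : (0:Int) ≤ 1)]
    simp only [List.drop_succ_cons, List.drop_zero]
    rw [foldA_eq_sumT, solveB_eq]
    simp

-- ===== VERDICT (by name: the statement is the Claim_ definition above) =====
theorem energyDemand_spec : Claim_equal_energyDemand := by
  intro configuration user_demand _ _
  unfold Spec_energyDemand
  exact ports_agree configuration user_demand
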